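-- pv_equiv track=rewrite | github.com/15091444119/MASS | MASS-unsupNMT/src/evaluation/eval_context_combiner/dataset.py | filter_alignment_one2one
-- ===== SOURCE A (Python) =====
-- def filter_alignment_one2one(alignment):
--     """ Delete one to many and many to one in the alignment
--     Params:
--         alignment: fastalign output, like "0-0 1-1 2-3"
--     Returns:
--         one-one alignment
--     Example:
--         alignment: "0-0 0-1 1-2 2-2 3-2 4-4"
--         output: "4-4"
--     """
--     s2t = {}
--     t2s = {}
--     for word_align in alignment.rstrip().split(' '):
--         src_id, tgt_id = word_align.split('-')
--         if src_id not in s2t: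
--             s2t[src_id] = [tgt_id]
--         else:
--             s2t[src_id].append(tgt_id)
--         if tgt_id not in t2s:
--             t2s[tgt_id] = [src_id]
--         else:
--             t2s[tgt_id].append(src_id)
--
--     filtered_alignment = []
--     for src_id, tgt_id_list in s2t.items():
--         if len(tgt_id_list) == 1:
--             if len(t2s[tgt_id_list[0]]) == 1:
--                 filtered_alignment.append("{}-{}".format(src_id, tgt_id_list[0]))
--
--     return ' '.join(filtered_alignment)
-- ===== SOURCE B (Python) =====
-- def filter_alignment_one2one(alignment):
--     """No index structures at all: for each alignment pair, a direct scan of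
--     all the other pairs checks that none shares its source or its target;
--     survivors are emitted in token order (quadratic, but allocation-free)."""
--     pairs = [tok.split('-') for tok in alignment.rstrip().split(' ')]
--     kept = []
--     for i, (src, tgt) in enumerate(pairs):
--         if all(j == i or (s != src and t != tgt) for j, (s, t) in enumerate(pairs)):
--             kept.append(src + '-' + tgt)
--     return ' '.join(kept)
-- ===== Notes on version B (the rewrite author's own statement) =====
-- stated objective: alternative
-- what changed: Drops A's two adjacency-list dicts entirely: B decides each pair by a direct nested scan over all other pairs (no auxiliary index is ever built), emitting survivors in token order, which equals A's map insertion order because survivors have unique sources.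
import Mathlib
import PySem

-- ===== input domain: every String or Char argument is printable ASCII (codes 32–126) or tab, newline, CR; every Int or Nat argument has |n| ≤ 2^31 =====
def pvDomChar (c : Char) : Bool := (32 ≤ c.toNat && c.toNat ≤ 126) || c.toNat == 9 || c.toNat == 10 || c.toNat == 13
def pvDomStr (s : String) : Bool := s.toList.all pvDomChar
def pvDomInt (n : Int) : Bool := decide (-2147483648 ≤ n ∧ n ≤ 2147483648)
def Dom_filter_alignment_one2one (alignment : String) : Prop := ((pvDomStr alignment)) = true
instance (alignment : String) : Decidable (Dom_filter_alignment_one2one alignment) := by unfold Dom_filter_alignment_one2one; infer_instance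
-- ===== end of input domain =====

-- B drops A's two adjacency-list dicts entirely and decides each pair by a direct nested scan
-- over all the other pairs (objective: alternative; quadratic instead of dict-indexed).

-- shared primitive wrappers: Python s.split(sep) with a non-empty literal sep never raises
def pvSplit (s sep : String) : List String := (PySem.Str.split? s sep).getD []

-- `src_id, tgt_id = word_align.split('-')` (Python raises unless exactly 2 parts; Pre_ excludes that)
def pvParse (tok : String) : String × String :=
  let parts := pvSplit tok "-"
  (parts.getD 0 "", parts.getD 1 "")

-- ===== PORT A =====
def filter_alignment_one2one (alignment : String) : String :=
  let st := (pvSplit (PySem.Str.rstrip alignment) " ").foldl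
    (fun (st : PySem.Dict String (List String) × PySem.Dict String (List String)) tok =>
      let p := pvParse tok
      let s2t := if st.1.contains p.1 then st.1.modify p.1 [] (fun l => l ++ [p.2]) else st.1.insert p.1 [p.2]
      let t2s := if st.2.contains p.2 then st.2.modify p.2 [] (fun l => l ++ [p.1]) else st.2.insert p.2 [p.1]
      (s2t, t2s))
    (PySem.Dict.empty, PySem.Dict.empty)
  let filtered := st.1.items.foldl
    (fun acc q =>
      if q.2.length == 1 then
        if (st.2.getD (q.2.getD 0 "") []).length == 1 then
          acc ++ [q.1 ++ "-" ++ q.2.getD 0 ""]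
        else acc
      else acc) []
  PySem.Str.join " " filtered

-- ===== PORT B =====
def filter_alignment_one2one_alt (alignment : String) : String :=
  let pairs := (pvSplit (PySem.Str.rstrip alignment) " ").map pvParse
  let kept := (PySem.List.enumerate pairs).foldl
    (fun acc ip =>
      if (PySem.List.enumerate pairs).all
           (fun jq => jq.1 == ip.1 || (!(jq.2.1 == ip.2.1) && !(jq.2.2 == ip.2.2)))
      then acc ++ [ip.2.1 ++ "-" ++ ip.2.2] else acc) []
  PySem.Str.join " " kept

-- ===== PRECONDITION & SPEC =====
-- Pre_ excludes exactly the inputs on which Python A raises ValueError: a token of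
-- alignment.rstrip().split(' ') whose '-'-split does not have exactly 2 parts.
def Pre_filter_alignment_one2one (alignment : String) : Prop :=
  ∀ tok ∈ pvSplit (PySem.Str.rstrip alignment) " ", PySem.Str.count tok "-" = 1
instance (alignment : String) : Decidable (Pre_filter_alignment_one2one alignment) := by
  unfold Pre_filter_alignment_one2one; infer_instance
def pvWitness_filter_alignment_one2one : String := "0-0 0-1 1-2 2-2 3-2 4-4"

def Spec_filter_alignment_one2one (alignment : String) (out : String) : Prop := out = filter_alignment_one2one_alt alignment
instance (alignment : String) (out : String) : Decidable (Spec_filter_alignment_one2one alignment out) := by unfold Spec_filter_alignment_one2one; infer_instance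

-- ===== CLAIM (what is proved, stated in full; the proofs are below) =====
def Claim_equal_filter_alignment_one2one : Prop := ∀ (alignment : String), Dom_filter_alignment_one2one alignment → Pre_filter_alignment_one2one alignment → Spec_filter_alignment_one2one alignment (filter_alignment_one2one alignment)

-- ===== LEMMAS AND PROOFS =====

-- list of tgts aligned to src c, in order (what A's s2t stores), and dually
def pvGrpS (ps : List (String × String)) (c : String) : List String :=
  (ps.filter (fun p => p.1 == c)).map Prod.snd
def pvGrpT (ps : List (String × String)) (c : String) : List String :=
  (ps.filter (fun p => p.2 == c)).map Prod.fst
-- the common keep condition (src unique and tgt unique) and formatter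
def pvKeep (ps : List (String × String)) (p : String × String) : Bool :=
  ((ps.map Prod.fst).count p.1 == 1) && ((ps.map Prod.snd).count p.2 == 1)
def pvFmt (p : String × String) : String := p.1 ++ "-" ++ p.2

lemma pvGrpS_length (ps : List (String × String)) (c : String) :
    (pvGrpS ps c).length = (ps.map Prod.fst).count c := by
  simp [pvGrpS, List.count, List.countP_map]
  exact List.countP_eq_length_filter.symm

lemma pvGrpT_length (ps : List (String × String)) (c : String) :
    (pvGrpT ps c).length = (ps.map Prod.snd).count c := by
  simp [pvGrpT, List.count, List.countP_map]
  exact List.countP_eq_length_filter.symm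

lemma pv_filter_single {ps : List (String × String)} {p : String × String}
    (hp : p ∈ ps) (h1 : (ps.map Prod.fst).count p.1 = 1) :
    ps.filter (fun q => q.1 == p.1) = [p] := by
  have hlen : (ps.filter (fun q => q.1 == p.1)).length = 1 := by
    have := pvGrpS_length ps p.1
    simp [pvGrpS] at this
    omega
  obtain ⟨a, ha⟩ := List.length_eq_one_iff.mp hlen
  have hpin : p ∈ ps.filter (fun q => q.1 == p.1) := by
    simp [List.mem_filter, hp]
  rw [ha] at hpin
  simp at hpin
  rw [ha, hpin]

lemma pvGrpS_single {ps : List (String × String)} {p : String × String}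
    (hp : p ∈ ps) (h1 : (ps.map Prod.fst).count p.1 = 1) :
    pvGrpS ps p.1 = [p.2] := by
  simp [pvGrpS, pv_filter_single hp h1]

-- ordered dedup followed by a filter that only keeps unique elements = plain filter
lemma pv_update_filter (P : String → Bool) :
    ∀ (l s : List String), (∀ x, P x = true → s.count x + l.count x ≤ 1) →
      (List.foldl PySem.Set.add s l).filter P = s.filter P ++ l.filter P := by
  intro l
  induction l with
  | nil => intro s _; simp
  | cons x l ih =>
    intro s h
    by_cases hPx : P x = true
    · have hx := h x hPx
      have hsx : s.count x = 0 ∧ l.count x = 0 := by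
        have : (x :: l).count x = l.count x + 1 := by simp
        omega
      have hxs : x ∉ s := List.count_eq_zero.mp hsx.1
      have hadd : PySem.Set.add s x = s ++ [x] := by
        simp [PySem.Set.add, hxs]
      rw [List.foldl_cons, hadd, ih (s ++ [x]) ?_]
      · simp [List.filter_append, hPx]
      · intro y hPy
        have := h y hPy
        by_cases hxy : y = x
        · subst hxy
          simp [List.count_append, hsx.1, hsx.2]
        · have hxy' : x ≠ y := fun he => hxy he.symm
          have e1 : (s ++ [x]).count y = s.count y := by
            simp [List.count_append, hxy']
          rw [e1]
          have e2 : (x :: l).count y = l.count y := by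
            simp [hxy']
          omega
    · have hPx' : P x = false := by simpa using hPx
      have hadd : (PySem.Set.add s x).filter P = s.filter P ∧
          ∀ y, P y = true → (PySem.Set.add s x).count y = s.count y := by
        by_cases hc : x ∈ s
        · simp [PySem.Set.add, hc]
        · constructor
          · simp [PySem.Set.add, hc, List.filter_append, hPx']
          · intro y hPy
            have hxy : x ≠ y := fun he => by rw [← he] at hPy; simp [hPy] at hPx'
            simp [PySem.Set.add, hc, List.count_append, hxy]
      rw [List.foldl_cons, ih (PySem.Set.add s x) ?_]
      · rw [hadd.1]
        simp [hPx']
      · intro y hPy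
        rw [hadd.2 y hPy]
        have := h y hPy
        by_cases hxy : y = x
        · subst hxy
          have : (y :: l).count y = l.count y + 1 := by simp
          omega
        · have hxy' : x ≠ y := fun he => hxy he.symm
          have : (x :: l).count y = l.count y := by simp [hxy']
          omega

lemma pv_ofList_filter (P : String → Bool) (l : List String)
    (h : ∀ x, P x = true → l.count x ≤ 1) :
    (PySem.Set.ofList l).filter P = l.filter P := by
  have := pv_update_filter P l [] (by intro x hx; simpa using h x hx)
  simpa [PySem.Set.ofList, PySem.Set.empty] using this

-- the combinatorial core of the A side: A's per-source scan equals a per-token filter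
lemma pv_core (ps : List (String × String)) :
    ((PySem.Set.ofList (ps.map Prod.fst)).filter
        (fun k => (pvGrpS ps k).length == 1 && (pvGrpT ps ((pvGrpS ps k).getD 0 "")).length == 1)).map
      (fun k => k ++ "-" ++ (pvGrpS ps k).getD 0 "")
    = (ps.filter (pvKeep ps)).map pvFmt := by
  set P : String → Bool :=
    fun k => (pvGrpS ps k).length == 1 && (pvGrpT ps ((pvGrpS ps k).getD 0 "")).length == 1 with hP
  have hcnt : ∀ x, P x = true → (ps.map Prod.fst).count x ≤ 1 := by
    intro x hx
    rw [hP] at hx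
    simp only [Bool.and_eq_true, beq_iff_eq] at hx
    rw [← pvGrpS_length]
    omega
  rw [pv_ofList_filter P _ hcnt]
  rw [List.filter_map]
  have hfc : ps.filter (P ∘ Prod.fst) = ps.filter (pvKeep ps) := by
    apply List.filter_congr
    intro p hp
    by_cases h1 : (ps.map Prod.fst).count p.1 = 1
    · have hg := pvGrpS_single hp h1
      simp only [Function.comp, hP, pvKeep, hg, pvGrpT_length, h1]
      simp
    · have hlen : (pvGrpS ps p.1).length ≠ 1 := by rw [pvGrpS_length]; exact h1
      have e1 : ((pvGrpS ps p.1).length == 1) = false := beq_eq_false_iff_ne.mpr hlen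
      have e2 : (((ps.map Prod.fst).count p.1) == 1) = false := beq_eq_false_iff_ne.mpr h1
      simp only [Function.comp, hP, pvKeep]
      simp [e1, e2]
  rw [hfc, List.map_map]
  apply List.map_congr_left
  intro p hp
  rw [List.mem_filter] at hp
  have h1 : (ps.map Prod.fst).count p.1 = 1 := by
    have := hp.2
    simp only [pvKeep, Bool.and_eq_true, beq_iff_eq] at this
    exact this.1
  simp [Function.comp, pvFmt, pvGrpS_single hp.1 h1]

-- A's dict-building steps and their modify normal forms
def pvStepS (d : PySem.Dict String (List String)) (p : String × String) : PySem.Dict String (List String) :=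
  if d.contains p.1 then d.modify p.1 [] (fun l => l ++ [p.2]) else d.insert p.1 [p.2]
def pvStepT (d : PySem.Dict String (List String)) (p : String × String) : PySem.Dict String (List String) :=
  if d.contains p.2 then d.modify p.2 [] (fun l => l ++ [p.1]) else d.insert p.2 [p.1]
def pvS (ps : List (String × String)) : PySem.Dict String (List String) :=
  ps.foldl (fun d p => d.modify p.1 [] (fun l => l ++ [p.2])) PySem.Dict.empty
def pvT (ps : List (String × String)) : PySem.Dict String (List String) :=
  ps.foldl (fun d p => d.modify p.2 [] (fun l => l ++ [p.1])) PySem.Dict.empty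

lemma pv_getD_empty (k : String) : (PySem.Dict.empty : PySem.Dict String (List String)).getD k [] = [] := rfl

lemma pv_not_contains_getD (d : PySem.Dict String (List String)) (k : String)
    (h : d.contains k = false) : d.getD k [] = [] := by
  simp only [PySem.Dict.contains, List.any_eq_false] at h
  simp only [PySem.Dict.getD, PySem.Dict.get?]
  rw [List.find?_eq_none.mpr]
  · rfl
  · intro x hx
    simpa using h x hx

lemma pvStepS_eq (d : PySem.Dict String (List String)) (p : String × String) :
    pvStepS d p = d.modify p.1 [] (fun l => l ++ [p.2]) := by
  unfold pvStepS
  by_cases h : d.contains p.1 = true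
  · simp [h]
  · have h' : d.contains p.1 = false := by simpa using h
    simp [h', PySem.Dict.modify, pv_not_contains_getD d p.1 h']

lemma pvStepT_eq (d : PySem.Dict String (List String)) (p : String × String) :
    pvStepT d p = d.modify p.2 [] (fun l => l ++ [p.1]) := by
  unfold pvStepT
  by_cases h : d.contains p.2 = true
  · simp [h]
  · have h' : d.contains p.2 = false := by simpa using h
    simp [h', PySem.Dict.modify, pv_not_contains_getD d p.2 h']

lemma pv_foldS (ps : List (String × String)) : ps.foldl pvStepS PySem.Dict.empty = pvS ps := by
  unfold pvS
  congr 1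
  funext d p
  exact pvStepS_eq d p

lemma pv_foldT (ps : List (String × String)) : ps.foldl pvStepT PySem.Dict.empty = pvT ps := by
  unfold pvT
  congr 1
  funext d p
  exact pvStepT_eq d p

lemma pv_getD_S (ps : List (String × String)) (c : String) :
    (pvS ps).getD c [] = pvGrpS ps c := by
  unfold pvS
  rw [PySem.Dict.getD_foldl_modify_append]
  simp [pvGrpS]

lemma pv_getD_T (ps : List (String × String)) (c : String) :
    (pvT ps).getD c [] = pvGrpT ps c := by
  have h := PySem.Dict.getD_foldl_modify_append (ps.map Prod.swap) (PySem.Dict.empty) c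
  rw [List.foldl_map] at h
  have h2 : pvT ps = (ps.map Prod.swap).foldl (fun d p => d.modify p.1 [] (fun l => l ++ [p.2])) PySem.Dict.empty := by
    rw [List.foldl_map]; rfl
  rw [List.foldl_map] at h2
  rw [h2, h]
  simp only [List.filter_map, List.map_map, List.nil_append, pv_getD_empty]
  rfl

lemma pv_keys_S (ps : List (String × String)) : (pvS ps).keys = PySem.Set.ofList (ps.map Prod.fst) := by
  unfold pvS
  have := PySem.Dict.keys_foldl_modify_key ps (fun p => p.1) ([] : List String)
    (fun _ p => fun l => l ++ [p.2]) PySem.Dict.empty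
  exact this

lemma pv_nodup_keys_S (ps : List (String × String)) : (pvS ps).keys.Nodup := by
  unfold pvS
  exact PySem.Dict.nodup_keys_foldl_modify_key ps (fun p => p.1) ([] : List String)
    (fun _ p => fun l => l ++ [p.2]) PySem.Dict.empty List.nodup_nil

lemma pv_items_S (ps : List (String × String)) :
    (pvS ps).items = (PySem.Set.ofList (ps.map Prod.fst)).map (fun k => (k, pvGrpS ps k)) := by
  rw [PySem.Dict.items_eq_map_keys (pvS ps) (pv_nodup_keys_S ps) ([] : List String), pv_keys_S]
  apply List.map_congr_left
  intro k _
  rw [pv_getD_S]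

lemma pv_if_if {α : Type} (a b : Bool) (x y : α) :
    (if a then (if b then x else y) else y) = (if a && b then x else y) := by
  cases a <;> cases b <;> simp

lemma pvA (toks : List String) :
    (let st := toks.foldl
        (fun (st : PySem.Dict String (List String) × PySem.Dict String (List String)) tok =>
          let p := pvParse tok
          let s2t := if st.1.contains p.1 then st.1.modify p.1 [] (fun l => l ++ [p.2]) else st.1.insert p.1 [p.2]
          let t2s := if st.2.contains p.2 then st.2.modify p.2 [] (fun l => l ++ [p.1]) else st.2.insert p.2 [p.1]
          (s2t, t2s))
        (PySem.Dict.empty, PySem.Dict.empty)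
      let filtered := st.1.items.foldl
        (fun acc q =>
          if q.2.length == 1 then
            if (st.2.getD (q.2.getD 0 "") []).length == 1 then
              acc ++ [q.1 ++ "-" ++ q.2.getD 0 ""]
            else acc
          else acc) []
      PySem.Str.join " " filtered)
    = PySem.Str.join " "
        (((toks.map pvParse).filter (pvKeep (toks.map pvParse))).map pvFmt) := by
  set ps := toks.map pvParse with hps
  have h1 : toks.foldl
      (fun (st : PySem.Dict String (List String) × PySem.Dict String (List String)) tok =>
        let p := pvParse tok
        let s2t := if st.1.contains p.1 then st.1.modify p.1 [] (fun l => l ++ [p.2]) else st.1.insert p.1 [p.2]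
        let t2s := if st.2.contains p.2 then st.2.modify p.2 [] (fun l => l ++ [p.1]) else st.2.insert p.2 [p.1]
        (s2t, t2s))
      (PySem.Dict.empty, PySem.Dict.empty) = (pvS ps, pvT ps) := by
    rw [← pv_foldS, ← pv_foldT,
      ← PySem.List.foldl_prod_mk pvStepS pvStepT ps PySem.Dict.empty PySem.Dict.empty,
      hps, List.foldl_map]
    rfl
  simp only [h1]
  have h2 : ∀ c, (pvT ps).getD c [] = pvGrpT ps c := pv_getD_T ps
  simp only [pv_if_if, h2]
  have h3 := PySem.List.foldl_append_if
    (fun (q : String × List String) => q.2.length == 1 && (pvGrpT ps (q.2.getD 0 "")).length == 1)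
    (fun (q : String × List String) => q.1 ++ "-" ++ q.2.getD 0 "")
    ((pvS ps).items) ([] : List String)
  rw [h3, List.nil_append, pv_items_S, List.filter_map, List.map_map]
  exact congrArg (PySem.Str.join " ") (pv_core ps)

-- B side: a countP is 1 exactly when the one known satisfying element is the only one
lemma pv_countP_one_iff {β : Type} [DecidableEq β] {E : List β} {P : β → Bool} {a : β}
    (ha : a ∈ E) (hPa : P a = true) (hnd : E.Nodup) :
    E.countP P = 1 ↔ ∀ b ∈ E, P b = true → b = a := by
  constructor
  · intro h b hb hPb
    rw [List.countP_eq_length_filter] at h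
    obtain ⟨c, hc⟩ := List.length_eq_one_iff.mp h
    have ha' : a ∈ E.filter P := List.mem_filter.mpr ⟨ha, hPa⟩
    have hb' : b ∈ E.filter P := List.mem_filter.mpr ⟨hb, hPb⟩
    rw [hc] at ha' hb'
    simp at ha' hb'
    rw [hb', ha']
  · intro h
    rw [List.countP_eq_length_filter]
    have hsub : ∀ b ∈ E.filter P, b = a := fun b hb =>
      h b (List.mem_filter.mp hb).1 (List.mem_filter.mp hb).2
    have ha' : a ∈ E.filter P := List.mem_filter.mpr ⟨ha, hPa⟩
    have hnd' : (E.filter P).Nodup := hnd.filter P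
    cases hE : E.filter P with
    | nil => rw [hE] at ha'; cases ha'
    | cons x xs =>
      have hx : x = a := hsub x (by rw [hE] at hsub ⊢; exact List.mem_cons_self)
      cases xs with
      | nil => simp
      | cons y ys =>
        have hy : y = a := hsub y (by rw [hE]; simp)
        rw [hE] at hnd'
        rw [List.nodup_cons] at hnd'
        exact absurd (by rw [hx, hy] : x = y) (fun he => hnd'.1 (he ▸ List.mem_cons_self))

lemma pv_enum_key_inj (ps : List (String × String)) {a b : Int × (String × String)}
    (ha : a ∈ PySem.List.enumerate ps) (hb : b ∈ PySem.List.enumerate ps) (h : a.1 = b.1) :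
    a = b := by
  obtain ⟨k, hk, rfl⟩ := (PySem.List.mem_enumerate_iff ps 0 a).mp ha
  obtain ⟨m, hm, rfl⟩ := (PySem.List.mem_enumerate_iff ps 0 b).mp hb
  simp at h
  have : k = m := by exact_mod_cast h
  subst this
  rfl

lemma pv_enum_nodup (ps : List (String × String)) : (PySem.List.enumerate ps).Nodup := by
  have := PySem.List.pairwise_lt_enumerate ps 0
  exact this.imp (fun {a b} hlt (he : a = b) => by rw [he] at hlt; exact lt_irrefl _ hlt)

-- the nested all-scan at a position equals the count-based keep condition
lemma pv_cond_eq (ps : List (String × String)) (ip : Int × (String × String))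
    (hmem : ip ∈ PySem.List.enumerate ps) :
    ((PySem.List.enumerate ps).all
      (fun jq => jq.1 == ip.1 || (!(jq.2.1 == ip.2.1) && !(jq.2.2 == ip.2.2))))
    = pvKeep ps ip.2 := by
  set E := PySem.List.enumerate ps with hE
  have hnd := pv_enum_nodup ps
  have hsnd : E.map Prod.snd = ps := PySem.List.map_snd_enumerate ps 0
  have hcnt1 : (ps.map Prod.fst).count ip.2.1 = E.countP (fun jq => jq.2.1 == ip.2.1) := by
    rw [← hsnd, List.map_map, List.count, List.countP_map]
    rfl
  have hcnt2 : (ps.map Prod.snd).count ip.2.2 = E.countP (fun jq => jq.2.2 == ip.2.2) := by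
    rw [← hsnd, List.map_map, List.count, List.countP_map]
    rfl
  rw [Bool.eq_iff_iff]
  simp only [List.all_eq_true, Bool.or_eq_true, beq_iff_eq, Bool.and_eq_true,
    Bool.not_eq_eq_eq_not, Bool.not_true, beq_eq_false_iff_ne, ne_eq,
    pvKeep, hcnt1, hcnt2]
  have i1 := pv_countP_one_iff (P := fun jq => jq.2.1 == ip.2.1) hmem (by simp) hnd
  have i2 := pv_countP_one_iff (P := fun jq => jq.2.2 == ip.2.2) hmem (by simp) hnd
  constructor
  · intro h
    constructor
    · rw [i1]
      intro b hb hPb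
      rcases h b hb with hk | ⟨h1, _⟩
      · exact pv_enum_key_inj ps hb hmem hk
      · exact absurd (by simpa using hPb) h1
    · rw [i2]
      intro b hb hPb
      rcases h b hb with hk | ⟨_, h2⟩
      · exact pv_enum_key_inj ps hb hmem hk
      · exact absurd (by simpa using hPb) h2
  · rintro ⟨h1, h2⟩ jq hjq
    by_cases hk : jq.1 = ip.1
    · exact Or.inl hk
    · refine Or.inr ⟨fun he => hk ?_, fun he => hk ?_⟩
      · have := (i1.mp h1) jq hjq (by simpa using he)
        rw [this]
      · have := (i2.mp h2) jq hjq (by simpa using he)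
        rw [this]

lemma pvB (toks : List String) :
    (let pairs := toks.map pvParse
     let kept := (PySem.List.enumerate pairs).foldl
        (fun acc ip =>
          if (PySem.List.enumerate pairs).all
               (fun jq => jq.1 == ip.1 || (!(jq.2.1 == ip.2.1) && !(jq.2.2 == ip.2.2)))
          then acc ++ [ip.2.1 ++ "-" ++ ip.2.2] else acc) []
     PySem.Str.join " " kept)
    = PySem.Str.join " "
        (((toks.map pvParse).filter (pvKeep (toks.map pvParse))).map pvFmt) := by
  set ps := toks.map pvParse with hps
  have h3 := PySem.List.foldl_append_if
    (fun (ip : Int × (String × String)) => (PySem.List.enumerate ps).all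
        (fun jq => jq.1 == ip.1 || (!(jq.2.1 == ip.2.1) && !(jq.2.2 == ip.2.2))))
    (fun (ip : Int × (String × String)) => ip.2.1 ++ "-" ++ ip.2.2)
    (PySem.List.enumerate ps) ([] : List String)
  simp only [h3, List.nil_append]
  congr 1
  have hfc : (PySem.List.enumerate ps).filter
      (fun ip => (PySem.List.enumerate ps).all
        (fun jq => jq.1 == ip.1 || (!(jq.2.1 == ip.2.1) && !(jq.2.2 == ip.2.2))))
      = (PySem.List.enumerate ps).filter (fun ip => pvKeep ps ip.2) := by
    apply List.filter_congr
    intro ip hip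
    exact pv_cond_eq ps ip hip
  rw [hfc, show (fun (ip : Int × (String × String)) => ip.2.1 ++ "-" ++ ip.2.2) = pvFmt ∘ Prod.snd from rfl, ← List.map_map]
  congr 1
  have hsnd : (PySem.List.enumerate ps).map Prod.snd = ps := PySem.List.map_snd_enumerate ps 0
  have h4 : ((PySem.List.enumerate ps).map Prod.snd).filter (pvKeep ps)
      = ((PySem.List.enumerate ps).filter (fun ip => pvKeep ps ip.2)).map Prod.snd := by
    rw [List.filter_map]
    rfl
  rw [hsnd] at h4
  exact h4.symm

theorem filter_alignment_one2one_spec : Claim_equal_filter_alignment_one2one := by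
  intro alignment _ _
  unfold Spec_filter_alignment_one2one
  unfold filter_alignment_one2one filter_alignment_one2one_alt
  exact (pvA (pvSplit (PySem.Str.rstrip alignment) " ")).trans
    (pvB (pvSplit (PySem.Str.rstrip alignment) " ")).symm
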